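-- pv_equiv track=rewrite | github.com/jmsautrez-png/flask-spectacles | utils/search.py | generate_accent_variants
-- ===== SOURCE A (Python) =====
-- from itertools import product as _product
--
-- _ACCENT_WORDS = {
--     "pere": ["père"],
--     "noel": ["noël"],
--     "theatre": ["théâtre"],
--     "fee": ["fée"],
--     "ecole": ["école"],
--     "evenement": ["événement"],
--     "eveilleur": ["éveilleur"],
--     "etrange": ["étrange"],
--     "ete": ["été"],
--     "etoile": ["étoile"],
--     "general": ["général"],
--     "comedie": ["comédie"],
--     "magie": ["magie"],
--     "conte": ["conte"],
--     "danse": ["danse"],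
--     "cirque": ["cirque"],
--     "marionnette": ["marionnette"],
--     "clown": ["clown"],
-- }
--
-- def generate_accent_variants(query):
--     words = query.lower().split()
--     variants = []
--     for word in words:
--         word_variants = [word]
--         if word in _ACCENT_WORDS:
--             word_variants.extend(_ACCENT_WORDS[word])
--         variants.append(word_variants)
--     result = set()
--     for combo in _product(*variants):
--         result.add(" ".join(combo))
--     return result
-- ===== SOURCE B (Python) =====
-- _ACCENT_WORDS = {
--     "pere": ["père"],
--     "noel": ["noël"],
--     "theatre": ["théâtre"],
--     "fee": ["fée"],
--     "ecole": ["école"],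
--     "evenement": ["événement"],
--     "eveilleur": ["éveilleur"],
--     "etrange": ["étrange"],
--     "ete": ["été"],
--     "etoile": ["étoile"],
--     "general": ["général"],
--     "comedie": ["comédie"],
--     "magie": ["magie"],
--     "conte": ["conte"],
--     "danse": ["danse"],
--     "cirque": ["cirque"],
--     "marionnette": ["marionnette"],
--     "clown": ["clown"],
-- }
--
-- def generate_accent_variants(query):
--     def suffixes(words):
--         # full variant strings for this suffix of the word list, built back-to-front
--         if not words:
--             return [""]
--         head, rest = words[0], words[1:]
--         options = [head] + _ACCENT_WORDS.get(head, [])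
--         if not rest:
--             return options
--         tails = suffixes(rest)
--         return [v + " " + t for v in options for t in tails]
--     return set(suffixes(query.lower().split()))
-- ===== Notes on version B (the rewrite author's own statement) =====
-- stated objective: alternative
-- what changed: B is recursive: it builds the full variant strings back-to-front over the suffixes of the word list by direct string concatenation (v + ' ' + t), so there is no itertools.product, no tuple combinations and no join step; A stages per-word variant lists, takes their Cartesian product as tuples and joins each tuple.
import Mathlib
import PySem

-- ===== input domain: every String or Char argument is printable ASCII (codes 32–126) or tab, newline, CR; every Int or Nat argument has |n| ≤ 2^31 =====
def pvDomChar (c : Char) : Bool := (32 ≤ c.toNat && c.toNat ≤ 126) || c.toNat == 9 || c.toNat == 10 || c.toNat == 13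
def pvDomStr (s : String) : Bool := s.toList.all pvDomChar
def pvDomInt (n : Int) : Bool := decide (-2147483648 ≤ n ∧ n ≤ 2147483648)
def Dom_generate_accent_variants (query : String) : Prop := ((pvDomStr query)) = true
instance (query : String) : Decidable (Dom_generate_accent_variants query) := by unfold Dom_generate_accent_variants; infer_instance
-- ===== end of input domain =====

-- B builds the variant strings recursively back-to-front by direct concatenation (no product of
-- tuples, no join step); a genuinely different decomposition of the same task, same cost.

-- ===== PORT A =====
-- module constant _ACCENT_WORDS (shared by both ports)
def accentWords : PySem.Dict String (List String) := PySem.Dict.ofList [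
  ("pere", ["père"]), ("noel", ["noël"]), ("theatre", ["théâtre"]), ("fee", ["fée"]),
  ("ecole", ["école"]), ("evenement", ["événement"]), ("eveilleur", ["éveilleur"]),
  ("etrange", ["étrange"]), ("ete", ["été"]), ("etoile", ["étoile"]), ("general", ["général"]),
  ("comedie", ["comédie"]), ("magie", ["magie"]), ("conte", ["conte"]), ("danse", ["danse"]),
  ("cirque", ["cirque"]), ("marionnette", ["marionnette"]), ("clown", ["clown"])]

-- itertools.product(*variants): first list varies slowest, exactly itertools' order
def pvProduct (ls : List (List String)) : List (List String) :=
  match ls with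
  | [] => [[]]
  | vs :: rest => vs.flatMap (fun x => (pvProduct rest).map (fun t => x :: t))

def generate_accent_variants (query : String) : List String :=
  let words := PySem.Str.split₀ (PySem.Str.lower query)
  -- for word in words: word_variants = [word]; if word in dict: extend; variants.append(...)
  let variants := words.foldl (fun acc word =>
    acc ++ [[word] ++ (if accentWords.contains word then accentWords.getD word [] else [])]) []
  -- result = set(); for combo in product(*variants): result.add(" ".join(combo))
  (pvProduct variants).foldl
    (fun s combo => PySem.Set.add s (PySem.Str.join " " combo)) PySem.Set.empty

-- ===== PORT B =====
-- Python '+' on strings (exact: concatenation of code points)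
def pvStrCat (a b : String) : String := String.ofList (a.toList ++ b.toList)

-- def suffixes(words): full variant strings of the suffix, built back-to-front
def pvSuffixes : List String → List String
  | [] => [""]
  | head :: rest =>
    -- options = [head] + _ACCENT_WORDS.get(head, [])
    let options := head :: accentWords.getD head []
    if rest.isEmpty then options
    else
      let tails := pvSuffixes rest
      -- [v + " " + t for v in options for t in tails]
      options.flatMap (fun v => tails.map (fun t => pvStrCat v (pvStrCat " " t)))

def generate_accent_variants_alt (query : String) : List String :=
  -- return set(suffixes(query.lower().split()))
  PySem.Set.ofList (pvSuffixes (PySem.Str.split₀ (PySem.Str.lower query)))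

-- ===== PRECONDITION & SPEC =====
def Spec_generate_accent_variants (query : String) (out : List String) : Prop := out = generate_accent_variants_alt query
instance (query : String) (out : List String) : Decidable (Spec_generate_accent_variants query out) := by unfold Spec_generate_accent_variants; infer_instance

-- ===== CLAIM (what is proved, stated in full; the proofs are below) =====
def Claim_equal_generate_accent_variants : Prop := ∀ (query : String), Dom_generate_accent_variants query → Spec_generate_accent_variants query (generate_accent_variants query)

-- ===== LEMMAS AND PROOFS =====

-- A's per-word variant list equals B's options list
theorem variants_word_eq (word : String) :
    [word] ++ (if accentWords.contains word then accentWords.getD word [] else [])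
      = word :: accentWords.getD word [] := by
  by_cases h : accentWords.contains word = true
  · simp [h]
  · simp [eq_false_of_ne_true h,
      PySem.Dict.getD_of_not_contains accentWords [] (eq_false_of_ne_true h)]

theorem join_nil_str : PySem.Str.join " " [] = "" := by decide

theorem join_singleton_str (x : String) : PySem.Str.join " " [x] = x := by
  simp [PySem.Str.join, PySem.Chars.join_singleton]

theorem join_cons_of_ne_nil (x : String) (t : List String) (h : t ≠ []) :
    PySem.Str.join " " (x :: t) = pvStrCat x (pvStrCat " " (PySem.Str.join " " t)) := by
  obtain ⟨b, rest, rfl⟩ := List.exists_cons_of_ne_nil h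
  simp [PySem.Str.join, PySem.Chars.join_cons_cons, pvStrCat]

-- every combination produced from a nonempty list of variant lists is nonempty
theorem mem_pvProduct_cons_ne_nil {l : List String} {ls : List (List String)}
    {t : List String} (h : t ∈ pvProduct (l :: ls)) : t ≠ [] := by
  simp [pvProduct] at h
  obtain ⟨x, -, t', -, rfl⟩ := h
  simp

-- joining A's product combinations yields exactly B's recursively built strings
theorem map_join_product (ws : List String) :
    (pvProduct (ws.map (fun w => w :: accentWords.getD w []))).map (PySem.Str.join " ")
      = pvSuffixes ws := by
  induction ws with
  | nil => simp [pvProduct, pvSuffixes, join_nil_str]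
  | cons w rest ih =>
    cases rest with
    | nil =>
      simp [pvProduct, pvSuffixes, join_singleton_str, List.map_flatMap]
    | cons r rs =>
      rw [List.map_cons]
      show (pvProduct (_ :: _)).map _ = _
      rw [pvProduct, pvSuffixes]
      simp only [List.isEmpty_cons, if_neg Bool.false_ne_true, List.map_flatMap]
      rw [← ih]
      congr 1
      funext x
      rw [List.map_map, List.map_map]
      apply List.map_congr_left
      intro t ht
      exact join_cons_of_ne_nil x t (mem_pvProduct_cons_ne_nil ht)

-- ===== VERDICT (by name: the statement is the Claim_ definition above) =====
theorem generate_accent_variants_spec : Claim_equal_generate_accent_variants := by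
  intro query _
  unfold Spec_generate_accent_variants generate_accent_variants generate_accent_variants_alt
  simp only [PySem.List.foldl_append_singleton_eq_map, variants_word_eq, List.nil_append,
    ← PySem.Set.update_map_eq_foldl_add, PySem.Set.update_nil_left,
    PySem.Set.empty, map_join_product]
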